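-- pv_equiv track=rewrite | github.com/jdc5549/DesignControl | utils.py | rotate_to_ref
-- ===== SOURCE A (Python) =====
-- def rotate_to_ref(key):
-- 	rot_list = get_morph_key_rotations(key)
-- 	for rot in rot_list:
-- 		if rot[0] == 1:
-- 			return rot
-- 	for rot in rot_list:
-- 		if rot[0] == -1:
-- 			return rot
-- 	return key
--
-- def get_morph_key_rotations(key):
-- 	rot_list = [key]
-- 	key_copy = key.copy()
-- 	for i in range(7):
-- 		key_copy.append(key_copy.pop(0))
-- 		rot_list.append(key_copy)
-- 		key_copy = key_copy.copy()
-- 	return rot_list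
-- ===== SOURCE B (Python) =====
-- def rotate_to_ref(key):
--     cur = key
--     neg = None
--     for _ in range(8):
--         if cur[0] == 1:
--             return cur
--         if cur[0] == -1 and neg is None:
--             neg = cur
--         cur = cur[1:] + cur[:1]
--     return neg if neg is not None else key
-- ===== Notes on version B (the rewrite author's own statement) =====
-- stated objective: simpler
-- what changed: Replaces A's precomputation of all 8 rotations followed by two separate priority scans (first for a leading 1, then for a leading -1) with a single generate-and-test loop that builds each rotation on the fly, returns immediately on a leading 1, and carries a 'first -1 rotation' accumulator returned as fallback.
import Mathlib
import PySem

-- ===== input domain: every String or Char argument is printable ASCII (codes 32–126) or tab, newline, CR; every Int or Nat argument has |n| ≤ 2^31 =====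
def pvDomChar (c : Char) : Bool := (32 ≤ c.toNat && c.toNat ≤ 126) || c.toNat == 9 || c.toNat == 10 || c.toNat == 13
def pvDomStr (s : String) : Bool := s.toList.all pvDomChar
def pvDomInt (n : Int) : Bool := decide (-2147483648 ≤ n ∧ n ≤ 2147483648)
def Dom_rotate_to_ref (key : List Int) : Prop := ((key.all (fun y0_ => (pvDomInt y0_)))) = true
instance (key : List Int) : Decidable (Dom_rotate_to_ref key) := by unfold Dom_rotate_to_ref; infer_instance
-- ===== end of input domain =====

-- B replaces A's precomputed 8-rotation list plus two priority scans by a single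
-- generate-and-test pass carrying a 'first -1 rotation' accumulator (objective: simpler).


-- ===== PORT A =====
-- key_copy.append(key_copy.pop(0)) = drop 1 ++ take 1; exact for nonempty key_copy,
-- and key_copy = [] (Python: IndexError) is excluded by Pre_rotate_to_ref.
def morphStep (p : List (List Int) × List Int) (_ : Nat) : List (List Int) × List Int :=
  let kc := p.2.drop 1 ++ p.2.take 1
  (p.1 ++ [kc], kc)

def get_morph_key_rotations (key : List Int) : List (List Int) :=
  -- rot_list = [key]; for i in range(7): pop/append; rot_list.append(key_copy)
  ((List.range 7).foldl morphStep ([key], key)).1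

def rotate_to_ref (key : List Int) : List Int :=
  let rot_list := get_morph_key_rotations key
  -- for rot in rot_list: if rot[0] == 1: return rot
  match rot_list.find? (fun rot => PySem.List.pyGet? rot 0 == some 1) with
  | some rot => rot
  | none =>
    -- for rot in rot_list: if rot[0] == -1: return rot
    match rot_list.find? (fun rot => PySem.List.pyGet? rot 0 == some (-1)) with
    | some rot => rot
    | none => key

-- ===== PORT B =====
-- the 'for _ in range(8)' loop of Source B, with fuel = remaining iterations;
-- cur[1:] + cur[:1] is PySem.List.slice.
def altLoop (key : List Int) : List Int → Option (List Int) → Nat → List Int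
  | _, neg, 0 => neg.getD key          -- return neg if neg is not None else key
  | cur, neg, n + 1 =>
    if PySem.List.pyGet? cur 0 == some 1 then cur
    else
      altLoop key
        (PySem.List.slice cur (some 1) none ++ PySem.List.slice cur none (some 1))
        (if PySem.List.pyGet? cur 0 == some (-1) && neg.isNone then some cur else neg)
        n

def rotate_to_ref_alt (key : List Int) : List Int := altLoop key key none 8

-- ===== PRECONDITION & SPEC =====
-- Python A raises IndexError (pop from empty list) on key = []; B raises there too.
def Pre_rotate_to_ref (key : List Int) : Prop := key ≠ []
instance (key : List Int) : Decidable (Pre_rotate_to_ref key) := by unfold Pre_rotate_to_ref; infer_instance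
def pvWitness_rotate_to_ref : List Int := [3, 1, -1]

def Spec_rotate_to_ref (key : List Int) (out : List Int) : Prop := out = rotate_to_ref_alt key
instance (key : List Int) (out : List Int) : Decidable (Spec_rotate_to_ref key out) := by unfold Spec_rotate_to_ref; infer_instance

-- ===== CLAIM (what is proved, stated in full; the proofs are below) =====
def Claim_equal_rotate_to_ref : Prop := ∀ (key : List Int), Dom_rotate_to_ref key → Pre_rotate_to_ref key → Spec_rotate_to_ref key (rotate_to_ref key)

-- ===== LEMMAS AND PROOFS =====

-- the step both programs take: move the front element to the back
def rotStep (l : List Int) : List Int := l.drop 1 ++ l.take 1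

-- the first n successive rotations of cur
def rots (cur : List Int) : Nat → List (List Int)
  | 0 => []
  | n + 1 => cur :: rots (rotStep cur) n

-- B's loop, rephrased over the explicit list of candidates it visits
def bfind (key : List Int) : List (List Int) → Option (List Int) → List Int
  | [], neg => neg.getD key
  | c :: rest, neg =>
    if PySem.List.pyGet? c 0 == some 1 then c
    else bfind key rest (if PySem.List.pyGet? c 0 == some (-1) && neg.isNone then some c else neg)

lemma slice_step (l : List Int) :
    PySem.List.slice l (some 1) none ++ PySem.List.slice l none (some 1) = rotStep l := by
  have h1 : PySem.List.slice l (some ((1 : Nat) : Int)) none = l.drop 1 :=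
    PySem.List.slice_from_natCast l 1
  have h2 : PySem.List.slice l none (some ((1 : Nat) : Int)) = l.take 1 :=
    PySem.List.slice_to_natCast l 1
  simpa [rotStep] using congrArg₂ (· ++ ·) h1 h2

lemma altLoop_eq_bfind (key : List Int) :
    ∀ (n : Nat) (cur : List Int) (neg : Option (List Int)),
      altLoop key cur neg n = bfind key (rots cur n) neg := by
  intro n
  induction n with
  | zero => intro cur neg; simp [altLoop, rots, bfind]
  | succ n ih =>
    intro cur neg
    simp only [altLoop, rots, bfind, slice_step]
    split_ifs <;> first | rfl | exact ih _ _

lemma rotlist_eq_rots (key : List Int) : get_morph_key_rotations key = rots key 8 := by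
  simp [get_morph_key_rotations, show List.range 7 = [0,1,2,3,4,5,6] from rfl,
    morphStep, rots, rotStep]

lemma bfind_eq_scan (key : List Int) :
    ∀ (rl : List (List Int)) (neg : Option (List Int)),
      bfind key rl neg =
        match rl.find? (fun rot => PySem.List.pyGet? rot 0 == some 1) with
        | some rot => rot
        | none =>
          match neg with
          | some m => m
          | none =>
            match rl.find? (fun rot => PySem.List.pyGet? rot 0 == some (-1)) with
            | some rot => rot
            | none => key := by
  intro rl
  induction rl with
  | nil => intro neg; cases neg <;> simp [bfind]
  | cons c rest ih =>
    intro neg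
    simp only [bfind, List.find?]
    by_cases h1 : PySem.List.pyGet? c 0 == some 1
    · simp [h1]
    · by_cases h2 : PySem.List.pyGet? c 0 == some (-1)
      · cases neg <;> simp [h1, h2, ih]
      · cases neg <;> simp [h1, h2, ih]

-- ===== VERDICT (by name: the statement is the Claim_ definition above) =====
theorem rotate_to_ref_spec : Claim_equal_rotate_to_ref := by
  intro key _ _
  unfold Spec_rotate_to_ref rotate_to_ref rotate_to_ref_alt
  rw [rotlist_eq_rots, altLoop_eq_bfind, bfind_eq_scan]
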